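-- pv_equiv track=rewrite | github.com/misilva73/extendedMD | extendedMD/mdl.py | split_bs_len
-- ===== SOURCE A (Python) =====
-- def split_bs_len(members_dic_list, bs_len):
--     """
--     This function splits the BS sequence based on the position of the motif members
--     (i.e. subsequences in members_dic_list). This is a middle step in the MDL cost computation proposed by Tanaka et all
--
--     :param members_dic_list: list of dictionaries related to the BS subsequences that belong to a motif
--     :type members_dic_list: list of dic
--     :param bs_len: list of the lengths of each BS sequence
--     :type bs_len: list of int
--     :return: list of split BS lengths
--     :rtype: list of list of int
--     """
--     bs_position_list = [dic['bs_position'] for dic in members_dic_list]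
--     break_points = [pos[0] for pos in bs_position_list]
--     subseq_size = len(bs_position_list[0])
--     split_bs_len_list = []
--     if break_points[0] > 0:
--         first_seq = bs_len[0:break_points[0]]
--         split_bs_len_list.append(first_seq)
--     for i in range(len(break_points) - 1):
--         pattern_seq = bs_len[break_points[i]:break_points[i] + subseq_size]
--         split_bs_len_list.append(pattern_seq)
--         next_seq = bs_len[break_points[i] + subseq_size:break_points[i + 1]]
--         split_bs_len_list.append(next_seq)
--     final_pattern_seq = bs_len[break_points[-1]:break_points[-1] + subseq_size]
--     split_bs_len_list.append(final_pattern_seq)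
--     if break_points[-1] + subseq_size < len(bs_len):
--         final_seq = bs_len[break_points[-1] + subseq_size:]
--         split_bs_len_list.append(final_seq)
--     return split_bs_len_list
-- ===== SOURCE B (Python) =====
-- def split_bs_len(members_dic_list, bs_len):
--     """Boundary-list decomposition: build all cut points once, slice uniformly,
--     then drop the head/tail segment when A's boundary conditions say so."""
--     break_points = [dic['bs_position'][0] for dic in members_dic_list]
--     subseq_size = len(members_dic_list[0]['bs_position'])
--     n = len(bs_len)
--     boundaries = [0]
--     for bp in break_points:
--         boundaries.append(bp)
--         boundaries.append(bp + subseq_size)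
--     boundaries.append(n)
--     segments = [bs_len[a:b] for a, b in zip(boundaries, boundaries[1:])]
--     if break_points[0] <= 0:
--         segments = segments[1:]
--     if break_points[-1] + subseq_size >= n:
--         segments = segments[:-1]
--     return segments
-- ===== Notes on version B (the rewrite author's own statement) =====
-- stated objective: alternative
-- what changed: Instead of A's four special-cased append sites driven by an index loop over break_points, B builds one flat list of cut boundaries, produces every segment uniformly by slicing between consecutive boundary pairs, and then drops the head/tail segment by A's exact boundary tests.
import Mathlib
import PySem

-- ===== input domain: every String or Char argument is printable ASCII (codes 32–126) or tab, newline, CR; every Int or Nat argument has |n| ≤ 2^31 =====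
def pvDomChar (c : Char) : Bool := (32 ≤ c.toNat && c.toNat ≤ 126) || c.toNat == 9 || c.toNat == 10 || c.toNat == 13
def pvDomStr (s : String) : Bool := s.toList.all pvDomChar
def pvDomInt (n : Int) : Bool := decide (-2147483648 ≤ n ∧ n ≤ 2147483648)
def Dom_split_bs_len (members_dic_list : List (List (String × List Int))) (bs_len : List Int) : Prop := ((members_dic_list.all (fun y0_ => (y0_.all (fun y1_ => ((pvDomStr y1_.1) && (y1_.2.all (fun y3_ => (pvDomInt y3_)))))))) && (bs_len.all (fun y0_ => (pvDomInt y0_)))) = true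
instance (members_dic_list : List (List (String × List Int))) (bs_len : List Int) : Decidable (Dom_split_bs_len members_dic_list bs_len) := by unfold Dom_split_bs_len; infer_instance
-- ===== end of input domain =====

-- B replaces A's four special-cased append sites by a uniform slice over a flat
-- boundary list, with A's exact head/tail boundary tests; same cost (objective: alternative).

-- ===== PORT A =====
def split_bs_len (members_dic_list : List (List (String × List Int))) (bs_len : List Int) : List (List Int) :=
  let bs_position_list := members_dic_list.map (fun dic => (dic.lookup "bs_position").getD [])
  let break_points := bs_position_list.map (fun pos => PySem.List.pyGetD pos 0 0)
  let subseq_size : Int := ((PySem.List.pyGetD bs_position_list 0 []).length : Int)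
  let split1 : List (List Int) :=
    if PySem.List.pyGetD break_points 0 0 > 0 then
      [PySem.List.slice bs_len (some 0) (some (PySem.List.pyGetD break_points 0 0))]
    else []
  let split2 :=
    (PySem.List.pyRange 0 ((break_points.length : Int) - 1) 1).foldl (fun acc i =>
      let bpi := PySem.List.pyGetD break_points i 0
      (acc ++ [PySem.List.slice bs_len (some bpi) (some (bpi + subseq_size))])
        ++ [PySem.List.slice bs_len (some (bpi + subseq_size))
              (some (PySem.List.pyGetD break_points (i + 1) 0))]) split1
  let bpl := PySem.List.pyGetD break_points (-1) 0
  let split3 := split2 ++ [PySem.List.slice bs_len (some bpl) (some (bpl + subseq_size))]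
  if bpl + subseq_size < (bs_len.length : Int) then
    split3 ++ [PySem.List.slice bs_len (some (bpl + subseq_size)) none]
  else split3

-- ===== PORT B =====
def split_bs_len_alt (members_dic_list : List (List (String × List Int))) (bs_len : List Int) : List (List Int) :=
  let break_points := members_dic_list.map (fun dic =>
    PySem.List.pyGetD ((dic.lookup "bs_position").getD []) 0 0)
  let subseq_size : Int :=
    ((((PySem.List.pyGetD members_dic_list 0 []).lookup "bs_position").getD []).length : Int)
  let n : Int := (bs_len.length : Int)
  let boundaries :=
    (break_points.foldl (fun acc bp => acc ++ [bp, bp + subseq_size]) [(0 : Int)]) ++ [n]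
  let segments := (boundaries.zip boundaries.tail).map
    (fun p => PySem.List.slice bs_len (some p.1) (some p.2))
  let segments := if PySem.List.pyGetD break_points 0 0 ≤ 0 then
      PySem.List.slice segments (some 1) none else segments
  if n ≤ PySem.List.pyGetD break_points (-1) 0 + subseq_size then
    PySem.List.slice segments none (some (-1))
  else segments

-- ===== PRECONDITION & SPEC =====
-- Pre_ excludes exactly the inputs where A raises: an empty members_dic_list
-- (IndexError on bs_position_list[0]) and dicts whose 'bs_position' entry is
-- missing (KeyError) or an empty list (IndexError on pos[0]).
def Pre_split_bs_len (members_dic_list : List (List (String × List Int))) (bs_len : List Int) : Prop :=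
  members_dic_list ≠ [] ∧
    ∀ dic ∈ members_dic_list, ((dic.lookup "bs_position").getD []) ≠ []
instance (members_dic_list : List (List (String × List Int))) (bs_len : List Int) : Decidable (Pre_split_bs_len members_dic_list bs_len) := by unfold Pre_split_bs_len; infer_instance

def pvWitness_split_bs_len : (List (List (String × List Int))) × List Int :=
  ([[("bs_position", [1, 2])], [("bs_position", [4, 5])]], [7, 7, 7, 7, 7, 7, 7])

def Spec_split_bs_len (members_dic_list : List (List (String × List Int))) (bs_len : List Int) (out : List (List Int)) : Prop := out = split_bs_len_alt members_dic_list bs_len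
instance (members_dic_list : List (List (String × List Int))) (bs_len : List Int) (out : List (List Int)) : Decidable (Spec_split_bs_len members_dic_list bs_len out) := by unfold Spec_split_bs_len; infer_instance

-- ===== CLAIM (what is proved, stated in full; the proofs are below) =====
def Claim_equal_split_bs_len : Prop := ∀ (members_dic_list : List (List (String × List Int))) (bs_len : List Int), Dom_split_bs_len members_dic_list bs_len → Pre_split_bs_len members_dic_list bs_len → Spec_split_bs_len members_dic_list bs_len (split_bs_len members_dic_list bs_len)

-- ===== LEMMAS AND PROOFS =====

-- slicing up to the literal length equals slicing to the end
lemma slice_some_length {α : Type} (xs : List α) (a : Int) :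
    PySem.List.slice xs (some a) (some (xs.length : Int)) = PySem.List.slice xs (some a) none := by
  simp [PySem.List.slice, PySem.List.clampIdx]
  split_ifs <;> omega

-- A's indexed adjacent-pair loop over range(len-1), as a flatMap, equals the
-- flatMap over adjacent pairs of the list itself.
lemma flat_idx_eq_zip (g : Int → Int → List (List Int)) (bps : List Int) :
    (List.range (bps.length - 1)).flatMap
        (fun k => g (bps.getD k 0) (bps.getD (k + 1) 0))
      = (bps.zip bps.tail).flatMap (fun p => g p.1 p.2) := by
  induction bps with
  | nil => simp
  | cons b rest ih =>
    cases rest with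
    | nil => simp
    | cons b' rest' =>
      have key : (List.range (rest'.length + 1)).flatMap
          (fun k => g ((b :: b' :: rest').getD k 0) ((b :: b' :: rest').getD (k + 1) 0))
        = g b b' ++ (List.range rest'.length).flatMap
            (fun k => g ((b' :: rest').getD k 0) ((b' :: rest').getD (k + 1) 0)) := by
        rw [List.range_succ_eq_map]
        simp [List.flatMap_cons, List.flatMap_map]
      simp only [List.length_cons, Nat.add_sub_cancel] at ih ⊢
      rw [key, ih]
      simp

-- B's uniform pair-slicing over the boundary list, characterised.
lemma seg_boundaries (sl : Int → Int → List Int) (s n : Int) :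
    ∀ (bps : List Int) (b prev : Int),
      ((prev :: ((b :: bps).flatMap (fun bp => [bp, bp + s]) ++ [n])).zip
          (((b :: bps).flatMap (fun bp => [bp, bp + s])) ++ [n])).map
        (fun p => sl p.1 p.2)
      = [sl prev b]
        ++ ((b :: bps).zip (b :: bps).tail).flatMap
             (fun p => [sl p.1 (p.1 + s), sl (p.1 + s) p.2])
        ++ [sl ((b :: bps).getLast (by simp)) ((b :: bps).getLast (by simp) + s),
            sl ((b :: bps).getLast (by simp) + s) n] := by
  intro bps
  induction bps with
  | nil => intro b prev; simp
  | cons b' rest ih =>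
    intro b prev
    have h := ih b' (b + s)
    have hlast : (b :: b' :: rest).getLast (by simp) = (b' :: rest).getLast (by simp) := by
      simp [List.getLast_cons]
    simp only [List.flatMap_cons, List.cons_append, List.nil_append,
      List.zip_cons_cons, List.map_cons, List.tail_cons] at h ⊢
    rw [hlast, h]

-- the boundary foldl is a flatMap
lemma boundaries_eq_flatMap (s : Int) (bps : List Int) :
    bps.foldl (fun acc bp => acc ++ [bp, bp + s]) [(0 : Int)]
      = [(0 : Int)] ++ bps.flatMap (fun bp => [bp, bp + s]) :=
  PySem.List.foldl_append_eq_flatMap _ _ _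

-- A's main loop as a flatMap
lemma loopA_eq_flatMap (bs_len : List Int) (s : Int) (bps : List Int)
    (init : List (List Int)) :
    (PySem.List.pyRange 0 ((bps.length : Int) - 1) 1).foldl (fun acc i =>
        let bpi := PySem.List.pyGetD bps i 0
        (acc ++ [PySem.List.slice bs_len (some bpi) (some (bpi + s))])
          ++ [PySem.List.slice bs_len (some (bpi + s))
                (some (PySem.List.pyGetD bps (i + 1) 0))]) init
      = init ++ (bps.zip bps.tail).flatMap (fun p =>
          [PySem.List.slice bs_len (some p.1) (some (p.1 + s)),
           PySem.List.slice bs_len (some (p.1 + s)) (some p.2)]) := by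
  have ht : (((bps.length : Int) - 1) - 0).toNat = bps.length - 1 := by omega
  have hr : PySem.List.pyRange 0 ((bps.length : Int) - 1) 1
      = (List.range (bps.length - 1)).map (fun k : Nat => (k : Int)) := by
    rw [PySem.List.pyRange_one, ht]
    exact List.map_congr_left (fun k _ => by simp)
  rw [hr, List.foldl_map]
  rw [PySem.List.foldl_congr_mem _ _ (fun acc k => acc ++
        [PySem.List.slice bs_len (some (bps.getD k 0)) (some (bps.getD k 0 + s)),
         PySem.List.slice bs_len (some (bps.getD k 0 + s)) (some (bps.getD (k + 1) 0))]) init ?_]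
  · rw [PySem.List.foldl_append_eq_flatMap]
    rw [flat_idx_eq_zip (fun a b =>
        [PySem.List.slice bs_len (some a) (some (a + s)),
         PySem.List.slice bs_len (some (a + s)) (some b)]) bps]
  · intro acc k _
    have hk1 : ((k : Int) + 1) = ((k + 1 : Nat) : Int) := by push_cast; ring
    simp only [hk1, PySem.List.pyGetD_natCast]
    simp [List.append_assoc]

-- ===== VERDICT (by name: the statement is the Claim_ definition above) =====
theorem split_bs_len_spec : Claim_equal_split_bs_len := by
  intro mdl bs_len _ hpre
  obtain ⟨hne, hpos⟩ := hpre
  unfold Spec_split_bs_len split_bs_len split_bs_len_alt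
  obtain ⟨d0, rest, rfl⟩ := List.exists_cons_of_ne_nil hne
  simp only
  rw [List.map_map]
  have hmm : (PySem.List.pyGetD ((d0 :: rest).map (fun dic => (dic.lookup "bs_position").getD [])) 0 [])
      = (d0.lookup "bs_position").getD [] := by
    simp only [List.map_cons]
    exact PySem.List.pyGetD_zero_cons _ _ _
  have hm0 : PySem.List.pyGetD (d0 :: rest) 0 [] = d0 := PySem.List.pyGetD_zero_cons _ _ _
  rw [hmm, hm0]
  have hcomp : ((fun pos => PySem.List.pyGetD pos 0 0) ∘ fun dic : List (String × List Int) => (dic.lookup "bs_position").getD [])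
      = fun dic : List (String × List Int) => PySem.List.pyGetD ((dic.lookup "bs_position").getD []) 0 0 := rfl
  rw [hcomp]
  set s : Int := ((((d0.lookup "bs_position").getD []).length : Int)) with hs
  set bps : List Int := (d0 :: rest).map
    (fun dic : List (String × List Int) => PySem.List.pyGetD ((dic.lookup "bs_position").getD []) 0 0) with hbps
  have hbpsne : bps ≠ [] := by simp [hbps]
  -- rewrite A's loop and B's boundaries
  rw [loopA_eq_flatMap bs_len s bps]
  rw [boundaries_eq_flatMap s bps]
  obtain ⟨b0, bt, hb⟩ := List.exists_cons_of_ne_nil hbpsne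
  rw [hb]
  have hb0 : PySem.List.pyGetD (b0 :: bt) 0 0 = b0 := PySem.List.pyGetD_zero_cons _ _ _
  have hlast : PySem.List.pyGetD (b0 :: bt) (-1) 0 = (b0 :: bt).getLast (by simp) :=
    PySem.List.pyGetD_neg_one _ _ (by simp)
  rw [hb0, hlast]
  have hseg := seg_boundaries (fun a b => PySem.List.slice bs_len (some a) (some b)) s
    ((bs_len.length : Int)) bt b0 0
  simp only [List.cons_append, List.nil_append, List.tail_cons] at hseg ⊢
  rw [hseg]
  set L := (b0 :: bt).getLast (by simp : (b0 :: bt) ≠ []) with hL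
  set M := ((b0 :: bt).zip bt).flatMap (fun p =>
    [PySem.List.slice bs_len (some p.1) (some (p.1 + s)),
     PySem.List.slice bs_len (some (p.1 + s)) (some p.2)]) with hM
  by_cases h1 : b0 > 0
  · by_cases h2 : L + s < (bs_len.length : Int)
    · rw [if_pos h1, if_pos h2, if_neg (by omega), if_neg (by omega)]
      rw [slice_some_length bs_len (L + s)]
      simp
    · rw [if_pos h1, if_neg h2, if_pos (by omega), if_neg (by omega)]
      rw [show PySem.List.slice bs_len (some 0) (some b0) ::
            (M ++ [PySem.List.slice bs_len (some L) (some (L + s)),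
                   PySem.List.slice bs_len (some (L + s)) (some (bs_len.length : Int))])
          = (PySem.List.slice bs_len (some 0) (some b0) ::
            (M ++ [PySem.List.slice bs_len (some L) (some (L + s))]))
            ++ [PySem.List.slice bs_len (some (L + s)) (some (bs_len.length : Int))] by simp]
      rw [PySem.List.slice_to_neg_one, List.dropLast_concat]
      simp
  · by_cases h2 : L + s < (bs_len.length : Int)
    · rw [if_neg h1, if_pos h2, if_neg (by omega), if_pos (by omega)]
      rw [slice_some_length bs_len (L + s)]
      rw [PySem.List.slice_from_one]
      simp
    · rw [if_neg h1, if_neg h2, if_pos (by omega), if_pos (by omega)]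
      rw [PySem.List.slice_from_one]
      simp only [List.tail_cons]
      rw [show M ++ [PySem.List.slice bs_len (some L) (some (L + s)),
                   PySem.List.slice bs_len (some (L + s)) (some (bs_len.length : Int))]
          = (M ++ [PySem.List.slice bs_len (some L) (some (L + s))])
            ++ [PySem.List.slice bs_len (some (L + s)) (some (bs_len.length : Int))] by simp]
      rw [PySem.List.slice_to_neg_one, List.dropLast_concat]
      simp
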